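-- pv_equiv track=rewrite | github.com/andywaltlova/advent-of-code-2023 | 02.py | part_two
-- ===== SOURCE A (Python) =====
-- def part_two(dict_of_games: dict[int, list[dict[str,int]]]):
--     # So basically set power = maximum of every color in all sets in one game multiplied together
--     powers_sum = 0
--     for sets in dict_of_games.values():
--         power = 1
--         for color in ['red', 'blue', 'green']:
--             power *= max(set.get(color, 0) for set in sets)
--         powers_sum += power
--     return powers_sum
-- ===== SOURCE B (Python) =====
-- def part_two(dict_of_games):
--     # One pass per game: maintain three running maxima together instead of
--     # three independent generator scans.
--     total = 0
--     for sets in dict_of_games.values():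
--         r = b = g = None
--         for s in sets:
--             vr, vb, vg = s.get('red', 0), s.get('blue', 0), s.get('green', 0)
--             r = vr if r is None else max(r, vr)
--             b = vb if b is None else max(b, vb)
--             g = vg if g is None else max(g, vg)
--         total += r * b * g
--     return total
-- ===== Notes on version B (the rewrite author's own statement) =====
-- stated objective: alternative
-- what changed: B makes a single pass over each game's sets maintaining three running per-color maxima together, instead of A's three separate generator scans (one max() per color) over the same sets.
import Mathlib
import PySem

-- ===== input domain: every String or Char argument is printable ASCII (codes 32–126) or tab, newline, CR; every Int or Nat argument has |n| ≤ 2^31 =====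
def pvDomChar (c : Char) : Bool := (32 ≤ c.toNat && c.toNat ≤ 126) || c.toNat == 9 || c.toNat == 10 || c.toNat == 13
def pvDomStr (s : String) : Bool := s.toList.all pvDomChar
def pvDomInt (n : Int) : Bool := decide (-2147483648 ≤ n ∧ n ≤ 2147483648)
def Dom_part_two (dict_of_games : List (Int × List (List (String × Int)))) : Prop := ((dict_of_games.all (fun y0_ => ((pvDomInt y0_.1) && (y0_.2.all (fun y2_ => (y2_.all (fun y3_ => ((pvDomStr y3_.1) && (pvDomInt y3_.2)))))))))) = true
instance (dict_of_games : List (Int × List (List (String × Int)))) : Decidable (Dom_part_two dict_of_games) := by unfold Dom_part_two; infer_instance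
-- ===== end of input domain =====

-- B replaces A's three independent max() scans per game by one pass over the sets
-- maintaining three running per-color maxima together (alternative decomposition, same cost).


-- ===== PORT A =====
-- set.get(color, 0) on an inner dict (assoc list, first match wins)
def aGet (s : List (String × Int)) (color : String) : Int :=
  PySem.Dict.getD (PySem.Dict.mk s) color 0

-- max(set.get(color, 0) for set in sets); the none branch is unreachable under
-- Pre_ (Python raises ValueError on an empty iterable there)
def aColorMax (sets : List (List (String × Int))) (color : String) : Int :=
  match PySem.List.max? (sets.map (fun s => aGet s color)) (fun x => x) with
  | some m => m
  | none => 0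

def part_two (dict_of_games : List (Int × List (List (String × Int)))) : Int :=
  dict_of_games.foldl
    (fun powers_sum g =>
      powers_sum + (["red", "blue", "green"].foldl (fun power color => power * aColorMax g.2 color) 1))
    0

-- ===== PORT B =====
-- r = v if r is None else max(r, v)
def bUpd (m : Option Int) (v : Int) : Option Int :=
  match m with
  | none => some v
  | some r => some (max r v)

def part_two_alt (dict_of_games : List (Int × List (List (String × Int)))) : Int :=
  dict_of_games.foldl
    (fun total g =>
      let acc := g.2.foldl
        (fun (acc : Option Int × Option Int × Option Int) s =>
          (bUpd acc.1 (aGet s "red"), bUpd acc.2.1 (aGet s "blue"), bUpd acc.2.2 (aGet s "green")))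
        (none, none, none)
      -- r * b * g; the .getD 0 only makes the multiplication total: under Pre_
      -- the accumulators are 'some' (Python B raises TypeError on None there)
      total + acc.1.getD 0 * acc.2.1.getD 0 * acc.2.2.getD 0)
    0

-- ===== PRECONDITION & SPEC =====
-- Pre_ excludes (a) games with an empty list of sets, where A raises ValueError (and B
-- TypeError), and (b) assoc lists with duplicate game ids, which a Python dict cannot
-- represent (the entries would collapse), so no claim is made about them.
def Pre_part_two (dict_of_games : List (Int × List (List (String × Int)))) : Prop :=
  (∀ g ∈ dict_of_games, g.2 ≠ []) ∧ (dict_of_games.map (·.1)).Nodup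
instance (dict_of_games : List (Int × List (List (String × Int)))) : Decidable (Pre_part_two dict_of_games) := by unfold Pre_part_two; infer_instance

def pvWitness_part_two : (List (Int × List (List (String × Int)))) :=
  [(1, [[("red", 2), ("blue", 3)], [("green", 1)]]), (2, [[("red", 4)]])]

def Spec_part_two (dict_of_games : List (Int × List (List (String × Int)))) (out : Int) : Prop := out = part_two_alt dict_of_games
instance (dict_of_games : List (Int × List (List (String × Int)))) (out : Int) : Decidable (Spec_part_two dict_of_games out) := by unfold Spec_part_two; infer_instance

-- ===== CLAIM (what is proved, stated in full; the proofs are below) =====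
def Claim_equal_part_two : Prop := ∀ (dict_of_games : List (Int × List (List (String × Int)))), Dom_part_two dict_of_games → Pre_part_two dict_of_games → Spec_part_two dict_of_games (part_two dict_of_games)

-- ===== LEMMAS AND PROOFS =====

-- projections of B's triple fold: each component is its own independent fold
theorem fold3_proj (sets : List (List (String × Int))) (a b c : Option Int) :
    sets.foldl
      (fun (acc : Option Int × Option Int × Option Int) s =>
        (bUpd acc.1 (aGet s "red"), bUpd acc.2.1 (aGet s "blue"), bUpd acc.2.2 (aGet s "green")))
      (a, b, c)
    = (sets.foldl (fun m s => bUpd m (aGet s "red")) a,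
       sets.foldl (fun m s => bUpd m (aGet s "blue")) b,
       sets.foldl (fun m s => bUpd m (aGet s "green")) c) := by
  induction sets generalizing a b c with
  | nil => rfl
  | cons x t ih => simp [List.foldl, ih]

theorem foldl_bUpd_some (l : List Int) (x : Int) :
    l.foldl bUpd (some x) = some (l.foldl max x) := by
  induction l generalizing x with
  | nil => rfl
  | cons y t ih => simp [List.foldl, bUpd, ih]

-- B's running maximum over a nonempty game equals A's max() of the mapped values
theorem bMax_eq_aColorMax (sets : List (List (String × Int))) (color : String)
    (h : sets ≠ []) :
    (sets.foldl (fun m s => bUpd m (aGet s color)) none).getD 0 = aColorMax sets color := by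
  cases sets with
  | nil => exact absurd rfl h
  | cons x t =>
    have : (x :: t).foldl (fun m s => bUpd m (aGet s color)) none
        = ((x :: t).map (fun s => aGet s color)).foldl bUpd none := by
      rw [List.foldl_map]
    rw [this]
    simp only [List.map, List.foldl, bUpd]
    rw [foldl_bUpd_some]
    simp [aColorMax, PySem.List.max?_id_cons]

-- per-game: A's product of the three max() results equals B's product of running maxima
theorem game_term_eq (sets : List (List (String × Int))) (h : sets ≠ []) :
    ["red", "blue", "green"].foldl (fun power color => power * aColorMax sets color) 1
    = (sets.foldl
        (fun (acc : Option Int × Option Int × Option Int) s =>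
          (bUpd acc.1 (aGet s "red"), bUpd acc.2.1 (aGet s "blue"), bUpd acc.2.2 (aGet s "green")))
        (none, none, none)).1.getD 0 *
      (sets.foldl
        (fun (acc : Option Int × Option Int × Option Int) s =>
          (bUpd acc.1 (aGet s "red"), bUpd acc.2.1 (aGet s "blue"), bUpd acc.2.2 (aGet s "green")))
        (none, none, none)).2.1.getD 0 *
      (sets.foldl
        (fun (acc : Option Int × Option Int × Option Int) s =>
          (bUpd acc.1 (aGet s "red"), bUpd acc.2.1 (aGet s "blue"), bUpd acc.2.2 (aGet s "green")))
        (none, none, none)).2.2.getD 0 := by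
  rw [fold3_proj]
  simp only [List.foldl]
  rw [bMax_eq_aColorMax _ _ h, bMax_eq_aColorMax _ _ h, bMax_eq_aColorMax _ _ h]
  ring

-- the two outer folds agree for any accumulator when every game is nonempty
theorem fold_games_eq (d : List (Int × List (List (String × Int))))
    (h : ∀ g ∈ d, g.2 ≠ []) (init : Int) :
    d.foldl
      (fun powers_sum g =>
        powers_sum + (["red", "blue", "green"].foldl (fun power color => power * aColorMax g.2 color) 1))
      init
    = d.foldl
        (fun total g =>
          let acc := g.2.foldl
            (fun (acc : Option Int × Option Int × Option Int) s =>
              (bUpd acc.1 (aGet s "red"), bUpd acc.2.1 (aGet s "blue"), bUpd acc.2.2 (aGet s "green")))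
            (none, none, none)
          total + acc.1.getD 0 * acc.2.1.getD 0 * acc.2.2.getD 0)
        init := by
  induction d generalizing init with
  | nil => rfl
  | cons g t ih =>
    have hne : g.2 ≠ [] := h g (List.mem_cons_self ..)
    have stepA : ∀ (f : Int → (Int × List (List (String × Int))) → Int) (i : Int),
        (g :: t).foldl f i = t.foldl f (f i g) := fun _ _ => List.foldl_cons ..
    rw [stepA, stepA, game_term_eq g.2 hne]
    exact ih (fun x hx => h x (List.mem_cons_of_mem _ hx)) _

-- ===== VERDICT (by name: the statement is the Claim_ definition above) =====
theorem part_two_spec : Claim_equal_part_two := by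
  intro d _ hpre
  unfold Spec_part_two part_two part_two_alt
  exact fold_games_eq d hpre.1 0
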